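-- pv_equiv track=rewrite | github.com/scottkoskoski/gardening-app | backend/app/routes/frost_dates.py | parse_zone_number
-- ===== SOURCE A (Python) =====
-- def parse_zone_number(zone_str):
--     """Extract the numeric zone from a zone string like '7a' or '10b'."""
--     digits = ""
--     for ch in zone_str:
--         if ch.isdigit():
--             digits += ch
--         elif digits:
--             break
--     return int(digits) if digits else None
-- ===== SOURCE B (Python) =====
-- def parse_zone_number(zone_str):
--     """Extract the numeric zone from a zone string like '7a' or '10b'."""
--     runs = "".join(c if c.isdigit() else " " for c in zone_str).split()
--     return int(runs[0]) if runs else None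
-- ===== Notes on version B (the rewrite author's own statement) =====
-- stated objective: alternative
-- what changed: Replaced A's single accumulate-and-break scanner with a global transform pipeline: map every non-digit character to a space, split the result on whitespace, and int-convert the first token (no early exit, no character-by-character accumulation with break).
import Mathlib
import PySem

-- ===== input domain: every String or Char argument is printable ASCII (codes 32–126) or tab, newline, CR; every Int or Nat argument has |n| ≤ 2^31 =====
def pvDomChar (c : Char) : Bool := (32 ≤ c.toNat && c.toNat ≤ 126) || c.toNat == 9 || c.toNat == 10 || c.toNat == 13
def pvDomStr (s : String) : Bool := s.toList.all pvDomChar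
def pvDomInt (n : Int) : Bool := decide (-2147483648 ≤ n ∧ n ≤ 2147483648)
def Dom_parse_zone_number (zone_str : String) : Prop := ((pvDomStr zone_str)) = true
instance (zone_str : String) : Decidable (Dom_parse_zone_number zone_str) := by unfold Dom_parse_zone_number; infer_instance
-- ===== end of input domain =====

-- B replaces A's accumulate-and-break scanner with a global transform pipeline
-- (map every non-digit to a space, split on whitespace, int of the first token); objective: alternative, same cost.

-- ===== PORT A =====
-- the for-loop of A: state is the accumulated `digits`; `break` = return the state
def pzAloop : List Char → List Char → List Char
  | [], digits => digits
  | c :: rest, digits =>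
      if PySem.Chars.isdigit c then pzAloop rest (digits ++ [c])
      else if digits ≠ [] then digits
      else pzAloop rest digits

def parse_zone_number (zone_str : String) : Option Int :=
  let digits := pzAloop zone_str.toList []
  if digits ≠ [] then PySem.Int.ofChars? digits else none

-- ===== PORT B =====
def parse_zone_number_alt (zone_str : String) : Option Int :=
  let runs := PySem.Chars.split₀
    (zone_str.toList.map (fun c => if PySem.Chars.isdigit c then c else ' '))
  match runs with
  | [] => none
  | r :: _ => PySem.Int.ofChars? r

-- ===== PRECONDITION & SPEC =====
def Spec_parse_zone_number (zone_str : String) (out : Option Int) : Prop := out = parse_zone_number_alt zone_str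
instance (zone_str : String) (out : Option Int) : Decidable (Spec_parse_zone_number zone_str out) := by unfold Spec_parse_zone_number; infer_instance

-- ===== CLAIM (what is proved, stated in full; the proofs are below) =====
def Claim_equal_parse_zone_number : Prop := ∀ (zone_str : String), Dom_parse_zone_number zone_str → Spec_parse_zone_number zone_str (parse_zone_number zone_str)

-- ===== LEMMAS AND PROOFS =====
theorem pzAloop_ne_nil (l : List Char) (d : List Char) (h : d ≠ []) :
    pzAloop l d = d ++ l.takeWhile PySem.Chars.isdigit := by
  induction l generalizing d with
  | nil => simp [pzAloop]
  | cons c rest ih =>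
      by_cases hc : PySem.Chars.isdigit c
      · simp [pzAloop, hc, ih (d ++ [c]) (by simp)]
      · simp [pzAloop, hc, h]

theorem pzAloop_nil (l : List Char) :
    pzAloop l [] =
      (l.dropWhile (fun c => !PySem.Chars.isdigit c)).takeWhile PySem.Chars.isdigit := by
  induction l with
  | nil => simp [pzAloop]
  | cons c rest ih =>
      by_cases hc : PySem.Chars.isdigit c
      · simp [pzAloop, hc, pzAloop_ne_nil rest [c] (by simp)]
      · simp [pzAloop, hc, ih]

-- a digit character ('0'-'9') is never whitespace
theorem isspace_of_digit (c : Char) (hc : PySem.Chars.isdigit c = true) :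
    PySem.Chars.isspace c = false := by
  simp [PySem.Chars.isdigit, Char.le_def, UInt32.le_iff_toNat_le] at hc
  have hc' : 48 ≤ c.val.toNat ∧ c.val.toNat ≤ 57 := hc
  simp only [PySem.Chars.isspace, Char.toNat]
  simp only [Bool.or_eq_false_iff, Bool.and_eq_false_iff, decide_eq_false_iff_not]
  omega

-- split₀.go prepends acc.reverse: the accumulator only records already-finished tokens
theorem go_acc (l cur : List Char) (acc : List (List Char)) :
    PySem.Chars.split₀.go l cur acc = acc.reverse ++ PySem.Chars.split₀.go l cur [] := by
  induction l generalizing cur acc with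
  | nil => by_cases h : cur.isEmpty <;> simp [PySem.Chars.split₀.go, h]
  | cons c rest ih =>
      by_cases hs : PySem.Chars.isspace c
      · by_cases h : cur.isEmpty <;>
          simp [PySem.Chars.split₀.go, hs, h, ih [] acc, ih [] (cur.reverse :: acc), ih [] [cur.reverse]]
      · simp [PySem.Chars.split₀.go, hs, ih (c :: cur) acc]

theorem space_isspace : PySem.Chars.isspace ' ' = true := by decide

-- collect phase: with a nonempty current token, the first emitted token is cur.reverse ++ leading digit-run
theorem go_collect (l cur : List Char) (h : cur ≠ []) :
    (PySem.Chars.split₀.go (l.map (fun c => if PySem.Chars.isdigit c then c else ' ')) cur []).head?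
      = some (cur.reverse ++ l.takeWhile PySem.Chars.isdigit) := by
  induction l generalizing cur with
  | nil => simp [PySem.Chars.split₀.go, h]
  | cons c rest ih =>
      by_cases hc : PySem.Chars.isdigit c
      · have ih' := ih (c :: cur) (by simp)
        simp [PySem.Chars.split₀.go, isspace_of_digit c hc, ih', hc]
      · simp [PySem.Chars.split₀.go, hc, space_isspace, h,
              go_acc ((rest.map fun c => if PySem.Chars.isdigit c then c else ' ')) [] [cur.reverse]]

-- skip phase: leading non-digits map to spaces and are dropped without emitting a token
theorem go_skip (l : List Char) :
    PySem.Chars.split₀.go (l.map (fun c => if PySem.Chars.isdigit c then c else ' ')) [] []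
      = PySem.Chars.split₀.go ((l.dropWhile (fun c => !PySem.Chars.isdigit c)).map
          (fun c => if PySem.Chars.isdigit c then c else ' ')) [] [] := by
  induction l with
  | nil => simp
  | cons c rest ih =>
      by_cases hc : PySem.Chars.isdigit c
      · simp [hc]
      · simp [PySem.Chars.split₀.go, hc, space_isspace, ih]

-- ===== VERDICT (by name: the statement is the Claim_ definition above) =====
theorem parse_zone_number_spec : Claim_equal_parse_zone_number := by
  intro s _
  unfold Spec_parse_zone_number parse_zone_number parse_zone_number_alt
  simp only [pzAloop_nil, PySem.Chars.split₀]
  rw [go_skip s.toList]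
  cases hd : s.toList.dropWhile (fun c => !PySem.Chars.isdigit c) with
  | nil => simp [PySem.Chars.split₀.go]
  | cons c t =>
      have hc : PySem.Chars.isdigit c = true := by
        have := List.head_dropWhile_not (p := fun c => !PySem.Chars.isdigit c) (l := s.toList)
        rw [hd] at this
        simpa using this (by simp)
      have hhead := go_collect t [c] (by simp)
      cases hr : PySem.Chars.split₀.go (t.map fun c => if PySem.Chars.isdigit c then c else ' ') [c] [] with
      | nil => rw [hr] at hhead; simp at hhead
      | cons r rs =>
          rw [hr] at hhead
          simp at hhead
          simp [PySem.Chars.split₀.go, hc, isspace_of_digit c hc, hr, hhead]
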